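-- pv_equiv track=rewrite | github.com/ICPP2023/HEGMM | baselineap0.py | generatePermuteMask
-- ===== SOURCE A (Python) =====
-- def generatePermuteMask(dim):
--   result = []
--   tempDict = {}
--   for i in range(1,dim):
--       maskOne = [1] * dim * dim
--       maskZero = [0] * dim * dim
--       for k in range(1,i+1):
--           for j in range(dim-k, len(maskOne), dim):
--               maskOne[j] = 0
--               maskZero[j] = 1
--       tempDict[1] = maskOne.copy()
--       tempDict[-1] = maskZero.copy()
--       result.append(tempDict.copy())
--
--   return result
-- ===== SOURCE B (Python) =====
-- def generatePermuteMask(dim):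
--     # Maintain the two masks incrementally: iteration i only zeroes the one
--     # new column dim-i instead of rebuilding and re-scanning all i columns.
--     if dim <= 1:
--         return []
--     maskOne = [1] * (dim * dim)
--     maskZero = [0] * (dim * dim)
--     result = []
--     for i in range(1, dim):
--         for j in range(dim - i, dim * dim, dim):
--             maskOne[j] = 0
--             maskZero[j] = 1
--         result.append({1: maskOne.copy(), -1: maskZero.copy()})
--     return result
-- ===== Notes on version B (the rewrite author's own statement) =====
-- stated objective: faster
-- what changed: B keeps the two masks as running accumulators and zeroes only the one newly affected column per outer iteration, instead of A's rebuilding fresh masks and re-scanning all i columns (nested k-loop) each time.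
import Mathlib
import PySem

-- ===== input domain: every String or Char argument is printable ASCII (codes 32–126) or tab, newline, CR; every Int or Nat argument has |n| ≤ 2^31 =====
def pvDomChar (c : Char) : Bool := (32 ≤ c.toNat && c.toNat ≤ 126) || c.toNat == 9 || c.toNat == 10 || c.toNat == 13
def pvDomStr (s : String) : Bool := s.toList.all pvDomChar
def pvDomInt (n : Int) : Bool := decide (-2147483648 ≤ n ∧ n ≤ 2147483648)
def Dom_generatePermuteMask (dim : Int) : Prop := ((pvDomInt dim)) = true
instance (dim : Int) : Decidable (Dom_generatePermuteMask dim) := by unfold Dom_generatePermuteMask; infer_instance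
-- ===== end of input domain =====

-- B maintains the two masks as running accumulators, zeroing only the one new column per
-- iteration, instead of A's rebuilding fresh masks and re-scanning all previous columns (objective: faster).

-- ===== PORT A =====
-- shared inner j-loop: 'for j in range(c, lim, step): maskOne[j]=0; maskZero[j]=1'
-- (both Pythons contain this exact loop; j is always a valid non-negative index when the loop runs)
def pvZeroCol (lim step : Int) (ms : List Int × List Int) (c : Int) : List Int × List Int :=
  (PySem.List.pyRange c lim step).foldl (fun msx j => (msx.1.set j.toNat 0, msx.2.set j.toNat 1)) ms

def generatePermuteMask (dim : Int) : List (List (Int × List Int)) :=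
  ((PySem.List.pyRange 1 dim 1).foldl
    (fun (st : List (List (Int × List Int)) × PySem.Dict Int (List Int)) i =>
      let fresh : List Int × List Int :=
        (PySem.List.pyRepeat (PySem.List.pyRepeat [1] dim) dim,
         PySem.List.pyRepeat (PySem.List.pyRepeat [0] dim) dim)
      let masks := (PySem.List.pyRange 1 (i+1) 1).foldl
        (fun ms k => pvZeroCol (PySem.List.len ms.1) dim ms (dim - k)) fresh
      let d := (st.2.insert 1 masks.1).insert (-1) masks.2
      (st.1 ++ [d.items], d))
    ([], PySem.Dict.empty)).1

-- ===== PORT B =====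
def generatePermuteMask_alt (dim : Int) : List (List (Int × List Int)) :=
  if dim ≤ 1 then [] else
  ((PySem.List.pyRange 1 dim 1).foldl
    (fun (st : List (List (Int × List Int)) × (List Int × List Int)) i =>
      let ms := pvZeroCol (dim * dim) dim st.2 (dim - i)
      (st.1 ++ [[(1, ms.1), (-1, ms.2)]], ms))
    ([], (PySem.List.pyRepeat [1] (dim * dim), PySem.List.pyRepeat [0] (dim * dim)))).1

-- ===== PRECONDITION & SPEC =====
def Spec_generatePermuteMask (dim : Int) (out : List (List (Int × List Int))) : Prop := out = generatePermuteMask_alt dim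
instance (dim : Int) (out : List (List (Int × List Int))) : Decidable (Spec_generatePermuteMask dim out) := by unfold Spec_generatePermuteMask; infer_instance

-- ===== CLAIM (what is proved, stated in full; the proofs are below) =====
def Claim_equal_generatePermuteMask : Prop := ∀ (dim : Int), Dom_generatePermuteMask dim → Spec_generatePermuteMask dim (generatePermuteMask dim)

-- ===== LEMMAS AND PROOFS =====

-- pvZeroCol only overwrites entries: the first mask keeps its length
lemma pvZeroCol_len (lim step : Int) (ms : List Int × List Int) (c : Int) :
    (pvZeroCol lim step ms c).1.length = ms.1.length := by
  unfold pvZeroCol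
  generalize PySem.List.pyRange c lim step = l
  induction l generalizing ms with
  | nil => rfl
  | cons j t ih => simpa using ih (ms.1.set j.toNat 0, ms.2.set j.toNat 1)

-- in A's k-loop the bound 'len(maskOne)' is constant; replace it by that constant
lemma pvKfold_eq (dim lim : Int) (l : List Int) :
    ∀ ms : List Int × List Int, PySem.List.len ms.1 = lim →
    l.foldl (fun ms k => pvZeroCol (PySem.List.len ms.1) dim ms (dim - k)) ms
      = l.foldl (fun ms k => pvZeroCol lim dim ms (dim - k)) ms := by
  induction l with
  | nil => intro _ _; rfl
  | cons k t ih =>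
      intro ms h
      simp only [List.foldl_cons, h]
      refine ih _ ?_
      simp only [PySem.List.len] at h ⊢
      rw [pvZeroCol_len, h]

-- B's running masks after the iterations 1..m-1 have been processed
def pvMaskAt (dim m : Int) : List Int × List Int :=
  (PySem.List.pyRange 1 m 1).foldl (fun ms k => pvZeroCol (dim * dim) dim ms (dim - k))
    (PySem.List.pyRepeat [1] (dim * dim), PySem.List.pyRepeat [0] (dim * dim))

lemma pvMaskAt_succ (dim m : Int) (h : 1 ≤ m) :
    pvMaskAt dim (m + 1) = pvZeroCol (dim * dim) dim (pvMaskAt dim m) (dim - m) := by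
  unfold pvMaskAt
  rw [PySem.List.pyRange_one_succ_right h, List.foldl_append]
  rfl

-- A's fresh '[a]*dim*dim' equals B's '[a]*(dim*dim)' (for the dims on which the loop runs)
lemma pvFresh_eq (dim : Int) (h : 0 ≤ dim) (a : Int) :
    PySem.List.pyRepeat (PySem.List.pyRepeat [a] dim) dim = PySem.List.pyRepeat [a] (dim * dim) := by
  lift dim to ℕ using h
  rw [← Nat.cast_mul]
  simp [PySem.List.pyRepeat]
  rw [← Nat.cast_mul, Int.toNat_natCast]

lemma pvFresh_len (dim : Int) (h : 0 ≤ dim) (a : Int) :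
    PySem.List.len (PySem.List.pyRepeat (PySem.List.pyRepeat [a] dim) dim) = dim * dim := by
  rw [pvFresh_eq dim h a, PySem.List.pyRepeat_singleton]
  simp only [PySem.List.len, List.length_replicate]
  exact Int.toNat_of_nonneg (mul_nonneg h h)

-- tempDict after the two assignments, from its two possible shapes
lemma pvDict_empty (a b : List Int) :
    (PySem.Dict.empty.insert (1 : Int) a).insert (-1) b = PySem.Dict.mk [(1, a), (-1, b)] := rfl

lemma pvDict_shape (x y a b : List Int) :
    ((PySem.Dict.mk [((1 : Int), x), (-1, y)]).insert 1 a).insert (-1) b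
      = PySem.Dict.mk [(1, a), (-1, b)] := rfl

lemma pvDict_items (a b : List Int) :
    (PySem.Dict.mk [((1 : Int), a), (-1, b)]).items = [(1, a), (-1, b)] := rfl

-- the two outer loops stay in lockstep: same appended entries, B's state = pvMaskAt
lemma pvLoop_eq (dim : Int) (hd : 1 ≤ dim) :
    ∀ (n : Nat) (m : Int), 1 ≤ m → dim - m = n →
    ∀ (res : List (List (Int × List Int))) (d : PySem.Dict Int (List Int)),
    (d = PySem.Dict.empty ∨ ∃ x y, d = PySem.Dict.mk [(1, x), (-1, y)]) →
    ((PySem.List.pyRange m dim 1).foldl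
      (fun (st : List (List (Int × List Int)) × PySem.Dict Int (List Int)) i =>
        (st.1 ++
            [((st.2.insert 1
                  ((PySem.List.pyRange 1 (i+1) 1).foldl
                    (fun ms k => pvZeroCol (PySem.List.len ms.1) dim ms (dim - k))
                    (PySem.List.pyRepeat (PySem.List.pyRepeat [1] dim) dim,
                     PySem.List.pyRepeat (PySem.List.pyRepeat [0] dim) dim)).1).insert (-1)
                  ((PySem.List.pyRange 1 (i+1) 1).foldl
                    (fun ms k => pvZeroCol (PySem.List.len ms.1) dim ms (dim - k))
                    (PySem.List.pyRepeat (PySem.List.pyRepeat [1] dim) dim,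
                     PySem.List.pyRepeat (PySem.List.pyRepeat [0] dim) dim)).2).items],
          (st.2.insert 1
                ((PySem.List.pyRange 1 (i+1) 1).foldl
                  (fun ms k => pvZeroCol (PySem.List.len ms.1) dim ms (dim - k))
                  (PySem.List.pyRepeat (PySem.List.pyRepeat [1] dim) dim,
                   PySem.List.pyRepeat (PySem.List.pyRepeat [0] dim) dim)).1).insert (-1)
                ((PySem.List.pyRange 1 (i+1) 1).foldl
                  (fun ms k => pvZeroCol (PySem.List.len ms.1) dim ms (dim - k))
                  (PySem.List.pyRepeat (PySem.List.pyRepeat [1] dim) dim,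
                   PySem.List.pyRepeat (PySem.List.pyRepeat [0] dim) dim)).2))
      (res, d)).1
    = ((PySem.List.pyRange m dim 1).foldl
      (fun (st : List (List (Int × List Int)) × (List Int × List Int)) i =>
        (st.1 ++ [[(1, (pvZeroCol (dim * dim) dim st.2 (dim - i)).1),
                   (-1, (pvZeroCol (dim * dim) dim st.2 (dim - i)).2)]],
         pvZeroCol (dim * dim) dim st.2 (dim - i)))
      (res, pvMaskAt dim m)).1 := by
  intro n
  induction n with
  | zero =>
      intro m _ hm res d _
      rw [PySem.List.pyRange_one_eq_nil (by omega)]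
      rfl
  | succ n ih =>
      intro m hm1 hmn res d hdict
      rw [PySem.List.pyRange_one_cons (by omega)]
      simp only [List.foldl_cons]
      have hmask :
          (PySem.List.pyRange 1 (m+1) 1).foldl
            (fun ms k => pvZeroCol (PySem.List.len ms.1) dim ms (dim - k))
            (PySem.List.pyRepeat (PySem.List.pyRepeat [1] dim) dim,
             PySem.List.pyRepeat (PySem.List.pyRepeat [0] dim) dim)
          = pvZeroCol (dim * dim) dim (pvMaskAt dim m) (dim - m) := by
        rw [pvKfold_eq dim (dim * dim) _ _ (pvFresh_len dim (by omega) 1),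
            ← pvMaskAt_succ dim m hm1]
        unfold pvMaskAt
        rw [pvFresh_eq dim (by omega) 1, pvFresh_eq dim (by omega) 0]
      rcases hdict with h | ⟨x, y, h⟩ <;> subst h
      · simp only [hmask, pvDict_empty, pvDict_items]
        rw [← pvMaskAt_succ dim m hm1]
        exact ih (m + 1) (by omega) (by omega) _ _ (Or.inr ⟨_, _, rfl⟩)
      · simp only [hmask, pvDict_shape, pvDict_items]
        rw [← pvMaskAt_succ dim m hm1]
        exact ih (m + 1) (by omega) (by omega) _ _ (Or.inr ⟨_, _, rfl⟩)

-- ===== VERDICT (by name: the statement is the Claim_ definition above) =====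
theorem generatePermuteMask_spec : Claim_equal_generatePermuteMask := by
  intro dim _
  unfold Spec_generatePermuteMask generatePermuteMask generatePermuteMask_alt
  by_cases h : dim ≤ 1
  · rw [PySem.List.pyRange_one_eq_nil h, if_pos h]
    rfl
  · rw [if_neg h]
    have h1 : (1 : Int) ≤ dim := by omega
    have := pvLoop_eq dim h1 (dim - 1).toNat 1 le_rfl (by omega) [] PySem.Dict.empty (Or.inl rfl)
    simpa [pvMaskAt, PySem.List.pyRange_one_eq_nil] using this
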